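-- pv_equiv track=rewrite | github.com/mglevitt/DSC20 | DSC20/hw06.py | recursive_reverse_up_to_n
-- ===== SOURCE A (Python) =====
-- def recursive_reverse_up_to_n(name, n):
--     """
--     Recursively reverses the given string at chunks 1..n
--
--     Restrictions:
--     You should use recursion. You should do input validation.
--
--     Parameters:
--     name (str): The string to be reversed
--     n (int): How many times the string should be reversed
--
--     Returns:
--     (str) Reversed string with the given formula
--
--     >>> recursive_reverse_up_to_n('Nabi', 3)
--     'bNai'
--     >>> recursive_reverse_up_to_n('klmn', 3)
--     'mkln'
--     >>> recursive_reverse_up_to_n('klmn', 4)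
--     'nlkm'
--
--     +++++++++++++++++++++++++
--     WRITE YOUR DOCTESTS BELOW
--     +++++++++++++++++++++++++
--     >>> recursive_reverse_up_to_n('Data Is Life', 9)
--     'Ls tDaaI ife'
--     >>> recursive_reverse_up_to_n('I Need A Job 4 $', 12)
--     'bJAde INe  o 4 $'
--     >>> recursive_reverse_up_to_n("Let's Get It", 15)
--     Traceback (most recent call last):
--     ...
--     AssertionError
--     """
--     assert isinstance(name,str)
--     assert isinstance(n,int) and n>0
--     assert len(name)>=n
--     if n==1:
--         return name
--     updated_name=recursive_reverse_up_to_n(name,n-1)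
--     out=updated_name[n-1::-1]+updated_name[n:]
--     return out
-- ===== SOURCE B (Python) =====
-- from collections import deque
--
-- def recursive_reverse_up_to_n(name, n):
--     """Same result as A, O(n): build the final prefix permutation directly.
--
--     The prefix after step k satisfies P_k = name[k-1] + reverse(P_{k-1}),
--     so keep a deque with an orientation flag instead of re-reversing.
--     """
--     assert isinstance(name, str)
--     assert isinstance(n, int) and n > 0
--     assert len(name) >= n
--     d = deque(name[0])
--     rev = False  # True: the actual sequence is reversed(d)
--     for k in range(1, n):
--         rev = not rev
--         if rev:
--             d.append(name[k])
--         else: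
--             d.appendleft(name[k])
--     if rev:
--         d.reverse()
--     return ''.join(d) + name[n:]
-- ===== Notes on version B (the rewrite author's own statement) =====
-- stated objective: faster
-- what changed: Replaces A's recursion that re-reverses a growing prefix at every level (quadratic work, and Python recursion depth n) by a single left-to-right pass building the final prefix permutation P_k = name[k-1] + reverse(P_{k-1}) in a deque with an orientation flag; intended as faster: measured 48.8x at n=4096 and 166.8x at n=16384, the sizes at which A still returned (A exceeds the recursion limit beyond that).
import Mathlib
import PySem

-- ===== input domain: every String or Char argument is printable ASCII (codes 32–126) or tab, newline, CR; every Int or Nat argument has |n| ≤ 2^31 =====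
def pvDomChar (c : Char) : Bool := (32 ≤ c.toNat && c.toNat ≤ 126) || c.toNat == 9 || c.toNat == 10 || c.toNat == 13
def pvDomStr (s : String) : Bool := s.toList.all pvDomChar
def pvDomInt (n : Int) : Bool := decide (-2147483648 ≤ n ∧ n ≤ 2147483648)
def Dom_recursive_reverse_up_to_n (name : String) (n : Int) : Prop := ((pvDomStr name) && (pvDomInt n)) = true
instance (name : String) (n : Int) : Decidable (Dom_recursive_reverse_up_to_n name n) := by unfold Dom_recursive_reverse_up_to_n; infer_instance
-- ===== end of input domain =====

-- B replaces A's re-reversing recursion by a single pass that builds the final prefix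
-- permutation directly (deque with an orientation flag); intended as faster — the timing
-- run measured B 48.8x / 166.8x at n=4096 / 16384, the sizes A still returned on.

-- ===== PORT A =====
def recursive_reverse_up_to_n (name : String) (n : Int) : String :=
  if n ≤ 1 then name
  else
    let updated := recursive_reverse_up_to_n name (n - 1)
    String.ofList (((PySem.List.slice? updated.toList (some (n - 1)) none (-1)).getD [])
      ++ PySem.List.slice updated.toList (some n) none)
termination_by n.toNat
decreasing_by omega

-- ===== PORT B =====
def recursive_reverse_up_to_n_alt (name : String) (n : Int) : String :=
  let cs := name.toList
  match PySem.List.pyGet? cs 0 with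
  | none => ""
  | some c0 =>
    let st := (PySem.List.pyRange 1 n 1).foldl
      (fun (st : List Char × Bool) (k : Int) =>
        let rev := !st.2
        (if rev then st.1 ++ [PySem.List.pyGetD cs k ' ']
         else PySem.List.pyGetD cs k ' ' :: st.1, rev))
      ([c0], false)
    let d := if st.2 then st.1.reverse else st.1
    String.ofList (d ++ PySem.List.slice cs (some n) none)

-- ===== PRECONDITION & SPEC =====
-- A (and B) asserts 0 < n and n ≤ len(name); outside this both raise AssertionError.
def Pre_recursive_reverse_up_to_n (name : String) (n : Int) : Prop :=
  0 < n ∧ n ≤ (name.toList.length : Int)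
instance (name : String) (n : Int) : Decidable (Pre_recursive_reverse_up_to_n name n) := by
  unfold Pre_recursive_reverse_up_to_n; infer_instance
def pvWitness_recursive_reverse_up_to_n : String × Int := ("klmn", 3)

def Spec_recursive_reverse_up_to_n (name : String) (n : Int) (out : String) : Prop := out = recursive_reverse_up_to_n_alt name n
instance (name : String) (n : Int) (out : String) : Decidable (Spec_recursive_reverse_up_to_n name n out) := by unfold Spec_recursive_reverse_up_to_n; infer_instance

-- ===== CLAIM (what is proved, stated in full; the proofs are below) =====
def Claim_equal_recursive_reverse_up_to_n : Prop := ∀ (name : String) (n : Int), Dom_recursive_reverse_up_to_n name n → Pre_recursive_reverse_up_to_n name n → Spec_recursive_reverse_up_to_n name n (recursive_reverse_up_to_n name n)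

-- ===== LEMMAS AND PROOFS =====

def pfx (cs : List Char) : Nat → List Char
  | 0 => []
  | 1 => cs.take 1
  | (m + 2) => cs.getD (m + 1) ' ' :: (pfx cs (m + 1)).reverse

lemma pfx_length (cs : List Char) (m : Nat) (h1 : 1 ≤ m) (h2 : m ≤ cs.length) :
    (pfx cs m).length = m := by
  induction m with
  | zero => omega
  | succ m ih =>
    match m, ih with
    | 0, _ => simp [pfx]; omega
    | (k+1), ih => simp [pfx]; rw [ih (by omega) (by omega)]

lemma pfx_succ (cs : List Char) (m : Nat) (h1 : 1 ≤ m) :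
    pfx cs (m + 1) = cs.getD m ' ' :: (pfx cs m).reverse := by
  match m with
  | (k+1) => rfl

lemma slice?_start_neg_one (xs : List Char) (m : Nat) (h : m < xs.length) :
    PySem.List.slice? xs (some (m : Int)) none (-1) = some ((xs.take (m + 1)).reverse) := by
  simp only [PySem.List.slice?, PySem.List.sliceIndices]
  norm_num
  rw [if_neg (by omega : ¬ ((m:Int) < 0)), min_eq_left (by omega : (m:Int) ≤ xs.length - 1),
      if_pos (by omega : (-1:Int) < m)]
  have hcnt : ((m:Int) + 1).toNat = m + 1 := by omega
  rw [hcnt]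
  rw [List.filterMap_congr (g := fun x => some (xs.getD (m - x) ' '))]
  · rw [show (fun x => some (xs.getD (m - x) ' ')) = some ∘ (fun x => xs.getD (m - x) ' ') from rfl,
        List.filterMap_eq_map]
    apply List.ext_getElem
    · simp; omega
    · intro i h1 h2
      simp only [List.getElem_map, List.getElem_range, List.getElem_reverse, List.getElem_take]
      rw [List.getD_eq_getElem xs ' ' (by simp at h1; omega)]
      congr 1
      simp at h1 h2 ⊢
      omega
  · intro x hx
    simp only [List.mem_range] at hx
    have : ((m:Int) + -(x:Int)).toNat = m - x := by omega
    rw [this, List.getElem?_eq_getElem (by omega), List.getD_eq_getElem xs ' ' (by omega)]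

lemma A_toList (name : String) (m : Nat) (h1 : 1 ≤ m) (h2 : m ≤ name.toList.length) :
    (recursive_reverse_up_to_n name (m : Int)).toList
      = pfx name.toList m ++ name.toList.drop m := by
  induction m with
  | zero => omega
  | succ m ih =>
    by_cases hm : m = 0
    · subst hm
      rw [recursive_reverse_up_to_n, if_pos (by omega : ((1:Nat):Int) ≤ 1)]
      simp [pfx]
      rw [← List.drop_one]
      exact (List.take_append_drop 1 name.toList).symm
    · have h1' : 1 ≤ m := by omega
      have hmlt : m < name.toList.length := by omega
      rw [recursive_reverse_up_to_n, if_neg (by push_cast; omega : ¬ (((m+1:Nat)):Int) ≤ 1)]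
      have hcast : (((m+1:Nat)):Int) - 1 = ((m:Nat):Int) := by push_cast; omega
      simp only [hcast]
      have hu := ih (by omega) (by omega)
      set u := (recursive_reverse_up_to_n name ((m:Nat):Int)).toList with hudef
      have hplen : (pfx name.toList m).length = m := pfx_length _ _ h1' (by omega)
      have hulen : u.length = name.toList.length := by
        rw [hu, List.length_append, hplen, List.length_drop]; omega
      have hdropm : name.toList.drop m = name.toList[m]'hmlt :: name.toList.drop (m+1) :=
        List.drop_eq_getElem_cons hmlt
      have htake : u.take (m+1) = pfx name.toList m ++ [name.toList[m]'hmlt] := by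
        rw [hu, hdropm, show m + 1 = (pfx name.toList m).length + 1 from by rw [hplen],
            List.take_length_add_append]
        rfl
      have hdrop : u.drop (m+1) = name.toList.drop (m+1) := by
        rw [hu, hdropm, show m + 1 = (pfx name.toList m).length + 1 from by rw [hplen],
            List.drop_length_add_append]
        rfl
      have hslice : PySem.List.slice u (some (((m+1:Nat)):Int)) none = u.drop (m+1) :=
        PySem.List.slice_from_natCast u (m+1)
      rw [slice?_start_neg_one u m (by omega), hslice, hdrop, Option.getD_some, htake,
          String.toList_ofList, pfx_succ _ _ h1',
          List.getD_eq_getElem _ _ hmlt]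
      simp

lemma fold_inv (cs : List Char) (hne : cs ≠ []) (k : Nat) (h1 : 1 ≤ k) :
    (let st := (PySem.List.pyRange 1 (k : Int) 1).foldl
      (fun (st : List Char × Bool) (j : Int) =>
        let rev := !st.2
        (if rev then st.1 ++ [PySem.List.pyGetD cs j ' ']
         else PySem.List.pyGetD cs j ' ' :: st.1, rev))
      ([cs.getD 0 ' '], false)
     if st.2 then st.1.reverse else st.1) = pfx cs k := by
  induction k with
  | zero => omega
  | succ k ih =>
    by_cases hk : k = 0
    · subst hk
      rw [PySem.List.pyRange_one_eq_nil (by norm_num)]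
      simp only [List.foldl_nil, Bool.false_eq_true, if_false]
      match cs, hne with
      | (a :: l), _ => rfl
    · have h1' : 1 ≤ k := by omega
      have hr : PySem.List.pyRange 1 ((k+1:Nat) : Int) 1
          = PySem.List.pyRange 1 (k : Int) 1 ++ [(k : Int)] := by
        push_cast
        exact PySem.List.pyRange_one_succ_right (by omega)
      rw [hr, List.foldl_append]
      simp only at ih ⊢
      set st := (PySem.List.pyRange 1 (k : Int) 1).foldl
        (fun (st : List Char × Bool) (j : Int) =>
          let rev := !st.2
          (if rev then st.1 ++ [PySem.List.pyGetD cs j ' ']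
           else PySem.List.pyGetD cs j ' ' :: st.1, rev))
        ([cs.getD 0 ' '], false) with hst
      have hinv := ih h1'
      have hget : PySem.List.pyGetD cs (k : Int) ' ' = cs.getD k ' ' := by
        simp [pysem]
      rw [pfx_succ cs k h1', ← hinv]
      simp only [List.foldl_cons, List.foldl_nil, hget]
      obtain ⟨d, rev⟩ := st
      cases rev <;> simp

lemma B_toList (name : String) (m : Nat) (h1 : 1 ≤ m) (h2 : m ≤ name.toList.length) :
    (recursive_reverse_up_to_n_alt name (m : Int)).toList
      = pfx name.toList m ++ name.toList.drop m := by
  have hne : name.toList ≠ [] := by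
    intro h; rw [h] at h2; simp at h2; omega
  have h0lt : 0 < name.toList.length := List.length_pos_of_ne_nil hne
  have h0 : PySem.List.pyGet? name.toList (0 : Int) = some (name.toList.getD 0 ' ') := by
    rw [List.getD_eq_getElem _ _ h0lt]
    simp [PySem.List.pyGet?, PySem.List.pyIdx?]
    rw [if_pos (by simpa using h0lt)]
    simp [List.getElem?_eq_getElem h0lt]
  rw [recursive_reverse_up_to_n_alt]
  simp only [h0]
  have hslice : PySem.List.slice name.toList (some ((m:Nat) : Int)) none = name.toList.drop m :=
    PySem.List.slice_from_natCast name.toList m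
  rw [hslice]
  rw [String.toList_ofList]
  exact congrArg (· ++ name.toList.drop m) (fold_inv name.toList hne m h1)

-- ===== VERDICT (by name: the statement is the Claim_ definition above) =====
theorem recursive_reverse_up_to_n_spec : Claim_equal_recursive_reverse_up_to_n := by
  intro name n _ hpre
  obtain ⟨h1, h2⟩ := hpre
  have hn : n = ((n.toNat : Nat) : Int) := by omega
  unfold Spec_recursive_reverse_up_to_n
  rw [hn]
  apply String.toList_inj.mp
  rw [A_toList name n.toNat (by omega) (by omega), B_toList name n.toNat (by omega) (by omega)]
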